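-- pv_equiv track=rewrite | github.com/dgrotebeverborg/BackToPure | src/enrich_pure_external_persons.py | check_name_match
-- ===== SOURCE A (Python) =====
-- def check_name_match(alex_name, pure_authors):
--     # Check for exact full name match
--     if alex_name in pure_authors:
--         return pure_authors[alex_name]
--
--     # Split the alex_name into first and last names
--     alex_parts = alex_name.split(' ')
--     if len(alex_parts) < 2:
--         return None  # Not enough parts to compare
--
--     alex_first_name, alex_last_name = alex_parts[0], alex_parts[-1]
--
--     for pure_name in pure_authors:
--         pure_parts = pure_name.split(' ')
--         if len(pure_parts) < 2:
--             continue  # Skip if the name format is not as expected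
--
--         pure_first_name, pure_last_name = pure_parts[0], pure_parts[-1]
--
--         # Check if last names match and if first letter of first names match
--         if alex_last_name == pure_last_name and alex_first_name and pure_first_name and alex_first_name[0] == \
--                 pure_first_name[0]:
--             return pure_authors[pure_name]
--     return None
-- ===== SOURCE B (Python) =====
-- def check_name_match(alex_name, pure_authors):
--     # Exact full-name match fast path
--     if alex_name in pure_authors:
--         return pure_authors[alex_name]
--
--     alex_parts = alex_name.split(' ')
--     if len(alex_parts) < 2 or not alex_parts[0]:
--         return None
--
--     # One pass over the dict: keep the FIRST author id per (last name, first initial)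
--     index = {}
--     for name, author_id in pure_authors.items():
--         parts = name.split(' ')
--         if len(parts) >= 2 and parts[0]:
--             index.setdefault((parts[-1], parts[0][0]), author_id)
--
--     return index.get((alex_parts[-1], alex_parts[0][0]))
-- ===== Notes on version B (the rewrite author's own statement) =====
-- stated objective: alternative
-- what changed: Replaces A's per-author compare-and-return scan with a one-pass build of a (last name, first initial) -> id index (setdefault keeps the first author per key) followed by a single dictionary lookup, with the empty-first-name guard hoisted before the pass.
import Mathlib
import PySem

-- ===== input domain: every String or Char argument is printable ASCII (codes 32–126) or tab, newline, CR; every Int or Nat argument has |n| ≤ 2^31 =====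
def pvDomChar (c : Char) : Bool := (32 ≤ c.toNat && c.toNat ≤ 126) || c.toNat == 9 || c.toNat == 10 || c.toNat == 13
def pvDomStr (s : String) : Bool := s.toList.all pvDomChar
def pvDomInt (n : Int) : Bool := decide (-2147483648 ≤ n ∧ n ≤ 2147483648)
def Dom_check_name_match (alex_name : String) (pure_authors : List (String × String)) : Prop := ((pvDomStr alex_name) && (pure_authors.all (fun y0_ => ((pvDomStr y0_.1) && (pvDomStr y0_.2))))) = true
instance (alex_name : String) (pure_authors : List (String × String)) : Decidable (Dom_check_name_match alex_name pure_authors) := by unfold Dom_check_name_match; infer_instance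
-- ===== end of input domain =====

-- B replaces A's per-author comparison scan with a (last name, first initial) index built in one
-- pass followed by a single lookup — an alternative decomposition, not claimed faster.

-- s.split(' ') — with a one-char separator split? never returns none
def pvSplitSp (s : String) : List String := (PySem.Str.split? s " ").getD []

-- ===== PORT A =====
-- the 'for pure_name in pure_authors:' loop of A
def pvLoopA (af al : String) (d : PySem.Dict String String) : List String → Option String
  | [] => none
  | nm :: rest =>
    let pp := pvSplitSp nm
    if pp.length < 2 then pvLoopA af al d rest
    else
      let pf := pp.headD ""
      let pl := pp.getLastD ""
      if al = pl ∧ af ≠ "" ∧ pf ≠ "" ∧ af.toList.headD ' ' = pf.toList.headD ' '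
      then d.get? nm
      else pvLoopA af al d rest

def check_name_match (alex_name : String) (pure_authors : List (String × String)) : Option String :=
  let d := PySem.Dict.ofList pure_authors
  match d.get? alex_name with
  | some v => some v
  | none =>
    let ap := pvSplitSp alex_name
    if ap.length < 2 then none
    else pvLoopA (ap.headD "") (ap.getLastD "") d d.keys

-- ===== PORT B =====
-- one step of B's index-building pass (index.setdefault((parts[-1], parts[0][0]), author_id))
def pvIndexStep (idx : PySem.Dict (String × Char) String) (p : String × String) :
    PySem.Dict (String × Char) String :=
  let parts := pvSplitSp p.1
  if 2 ≤ parts.length ∧ parts.headD "" ≠ "" then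
    let key := (parts.getLastD "", (parts.headD "").toList.headD ' ')
    match idx.get? key with
    | some _ => idx
    | none => idx.insert key p.2
  else idx

def check_name_match_alt (alex_name : String) (pure_authors : List (String × String)) : Option String :=
  let d := PySem.Dict.ofList pure_authors
  match d.get? alex_name with
  | some v => some v
  | none =>
    let ap := pvSplitSp alex_name
    if ap.length < 2 ∨ ap.headD "" = "" then none
    else
      let idx := d.items.foldl pvIndexStep PySem.Dict.empty
      idx.get? (ap.getLastD "", (ap.headD "").toList.headD ' ')

-- ===== PRECONDITION & SPEC =====
def Spec_check_name_match (alex_name : String) (pure_authors : List (String × String)) (out : Option String) : Prop := out = check_name_match_alt alex_name pure_authors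
instance (alex_name : String) (pure_authors : List (String × String)) (out : Option String) : Decidable (Spec_check_name_match alex_name pure_authors out) := by unfold Spec_check_name_match; infer_instance

-- ===== CLAIM (what is proved, stated in full; the proofs are below) =====
def Claim_equal_check_name_match : Prop := ∀ (alex_name : String) (pure_authors : List (String × String)), Dom_check_name_match alex_name pure_authors → Spec_check_name_match alex_name pure_authors (check_name_match alex_name pure_authors)

-- ===== LEMMAS AND PROOFS =====

-- with an empty alex first name A's loop condition can never fire
theorem pvLoopA_empty_first (al : String) (d : PySem.Dict String String) (l : List String) :
    pvLoopA "" al d l = none := by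
  induction l with
  | nil => rfl
  | cons nm rest ih => simp [pvLoopA, ih]

-- unfolding pvLoopA one step, in the three shapes the main induction needs
theorem pvLoopA_cons_short (af al nm : String) (d : PySem.Dict String String) (l : List String)
    (h : (pvSplitSp nm).length < 2) : pvLoopA af al d (nm :: l) = pvLoopA af al d l := by
  simp only [pvLoopA]
  rw [if_pos h]

theorem pvLoopA_cons_hit (af al nm : String) (d : PySem.Dict String String) (l : List String)
    (h : ¬ (pvSplitSp nm).length < 2)
    (hc : al = (pvSplitSp nm).getLastD "" ∧ af ≠ "" ∧ (pvSplitSp nm).headD "" ≠ ""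
          ∧ af.toList.headD ' ' = ((pvSplitSp nm).headD "").toList.headD ' ') :
    pvLoopA af al d (nm :: l) = d.get? nm := by
  simp only [pvLoopA]
  rw [if_neg h, if_pos hc]

theorem pvLoopA_cons_miss (af al nm : String) (d : PySem.Dict String String) (l : List String)
    (h : ¬ (pvSplitSp nm).length < 2)
    (hc : ¬ (al = (pvSplitSp nm).getLastD "" ∧ af ≠ "" ∧ (pvSplitSp nm).headD "" ≠ ""
          ∧ af.toList.headD ' ' = ((pvSplitSp nm).headD "").toList.headD ' ')) :
    pvLoopA af al d (nm :: l) = pvLoopA af al d l := by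
  simp only [pvLoopA]
  rw [if_neg h, if_neg hc]

-- pairwise-distinct keys (the invariant Dict.ofList establishes)
def pvNK {κ ν : Type} [BEq κ] (l : List (κ × ν)) : Prop :=
  l.Pairwise (fun p q => (p.1 == q.1) = false)

theorem pvNK_insert {κ ν : Type} [BEq κ] [LawfulBEq κ] (d : PySem.Dict κ ν) (k : κ) (v : ν)
    (h : pvNK d.items) : pvNK (d.insert k v).items := by
  unfold PySem.Dict.insert pvNK at *
  by_cases hc : d.contains k = true
  · rw [if_pos hc]
    rw [List.pairwise_map]
    refine h.imp ?_
    intro p q hpq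
    by_cases h1 : (p.1 == k) = true <;> by_cases h2 : (q.1 == k) = true <;>
      simp_all [beq_iff_eq]
  · rw [if_neg hc]
    rw [List.pairwise_append]
    refine ⟨h, List.pairwise_singleton _ _, ?_⟩
    intro p hp q hq
    simp only [List.mem_singleton] at hq
    subst hq
    simp only [PySem.Dict.contains, List.any_eq_true] at hc
    push Not at hc
    exact Bool.eq_false_iff.mpr (hc p hp)

theorem pvNK_update {κ ν : Type} [BEq κ] [LawfulBEq κ] (l : List (κ × ν)) (d : PySem.Dict κ ν)
    (h : pvNK d.items) : pvNK (d.update l).items := by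
  induction l generalizing d with
  | nil => exact h
  | cons p t ih => exact ih _ (pvNK_insert d p.1 p.2 h)

theorem pvNK_ofList {κ ν : Type} [BEq κ] [LawfulBEq κ] (l : List (κ × ν)) :
    pvNK (PySem.Dict.ofList l).items :=
  pvNK_update l PySem.Dict.empty List.Pairwise.nil

theorem pvFind_of_mem {κ ν : Type} [BEq κ] [LawfulBEq κ] (l : List (κ × ν))
    (h : pvNK l) (p : κ × ν) (hm : p ∈ l) : l.find? (fun q => q.1 == p.1) = some p := by
  induction l with
  | nil => cases hm
  | cons a t ih =>
    have hpc := List.pairwise_cons.mp h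
    rcases List.mem_cons.mp hm with rfl | hm'
    · simp [List.find?_cons_of_pos]
    · have ha : (a.1 == p.1) = false := hpc.1 p hm'
      rw [List.find?_cons_of_neg (by simp [ha])]
      exact ih hpc.2 hm'

theorem pvGet?_of_mem {κ ν : Type} [BEq κ] [LawfulBEq κ] (d : PySem.Dict κ ν)
    (h : pvNK d.items) (p : κ × ν) (hm : p ∈ d.items) : d.get? p.1 = some p.2 := by
  unfold PySem.Dict.get?
  rw [pvFind_of_mem d.items h p hm]
  rfl

-- the core correspondence: B's index lookup equals A's scan, for any starting accumulator
theorem pvIndex_loop (af al : String) (haf : af ≠ "") (d : PySem.Dict String String)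
    (ps : List (String × String)) (hps : ∀ p ∈ ps, d.get? p.1 = some p.2)
    (idx0 : PySem.Dict (String × Char) String) :
    (ps.foldl pvIndexStep idx0).get? (al, af.toList.headD ' ')
      = (idx0.get? (al, af.toList.headD ' ')).or
          (pvLoopA af al d (ps.map Prod.fst)) := by
  induction ps generalizing idx0 with
  | nil => simp [pvLoopA]
  | cons p t ih =>
    have hp : d.get? p.1 = some p.2 := hps p (List.mem_cons_self ..)
    have hps' : ∀ q ∈ t, d.get? q.1 = some q.2 := fun q hq => hps q (List.mem_cons_of_mem _ hq)
    rw [List.foldl_cons, ih hps', List.map_cons]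
    by_cases hc : 2 ≤ (pvSplitSp p.1).length ∧ (pvSplitSp p.1).headD "" ≠ ""
    · obtain ⟨hlen2, hpf⟩ := hc
      have hnlt : ¬ (pvSplitSp p.1).length < 2 := by omega
      by_cases hk : ((pvSplitSp p.1).getLastD "", ((pvSplitSp p.1).headD "").toList.headD ' ')
          = (al, af.toList.headD ' ')
      · -- this entry's key is the key looked up: A's condition fires here
        have h1 : (pvSplitSp p.1).getLastD "" = al := congrArg Prod.fst hk
        have h2 : ((pvSplitSp p.1).headD "").toList.headD ' ' = af.toList.headD ' ' :=
          congrArg Prod.snd hk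
        rw [pvLoopA_cons_hit af al p.1 d _ hnlt ⟨h1.symm, haf, hpf, h2.symm⟩, hp]
        cases hg : idx0.get? (al, af.toList.headD ' ') with
        | some w =>
          have hstep : pvIndexStep idx0 p = idx0 := by
            unfold pvIndexStep
            rw [if_pos ⟨hlen2, hpf⟩, hk]
            simp only [hg]
          rw [hstep, hg, Option.some_or, Option.some_or]
        | none =>
          have hstep : pvIndexStep idx0 p = idx0.insert (al, af.toList.headD ' ') p.2 := by
            unfold pvIndexStep
            rw [if_pos ⟨hlen2, hpf⟩, hk]
            simp only [hg]
          rw [hstep, PySem.Dict.get?_insert_self, Option.some_or, Option.none_or]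
      · -- different key: A's condition cannot fire, B's insert (if any) misses the lookup key
        have hcnd : ¬ (al = (pvSplitSp p.1).getLastD "" ∧ af ≠ "" ∧ (pvSplitSp p.1).headD "" ≠ ""
            ∧ af.toList.headD ' ' = ((pvSplitSp p.1).headD "").toList.headD ' ') := by
          rintro ⟨hx1, -, -, hx4⟩
          exact hk (by rw [hx1, hx4])
        rw [pvLoopA_cons_miss af al p.1 d _ hnlt hcnd]
        cases hg : idx0.get? ((pvSplitSp p.1).getLastD "", ((pvSplitSp p.1).headD "").toList.headD ' ') with
        | some w =>
          have hstep : pvIndexStep idx0 p = idx0 := by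
            unfold pvIndexStep
            rw [if_pos ⟨hlen2, hpf⟩]
            simp only [hg]
          rw [hstep]
        | none =>
          have hstep : pvIndexStep idx0 p
              = idx0.insert ((pvSplitSp p.1).getLastD "", ((pvSplitSp p.1).headD "").toList.headD ' ') p.2 := by
            unfold pvIndexStep
            rw [if_pos ⟨hlen2, hpf⟩]
            simp only [hg]
          rw [hstep, PySem.Dict.get?_insert_of_ne _ _ (fun hx => hk hx.symm)]
    · -- malformed entry: both sides skip it
      have hstep : pvIndexStep idx0 p = idx0 := by unfold pvIndexStep; rw [if_neg hc]
      rw [hstep]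
      push Not at hc
      by_cases hlen : (pvSplitSp p.1).length < 2
      · rw [pvLoopA_cons_short af al p.1 d _ hlen]
      · have hpf : (pvSplitSp p.1).headD "" = "" := hc (by omega)
        rw [pvLoopA_cons_miss af al p.1 d _ hlen (fun h => h.2.2.1 hpf)]

-- ===== VERDICT (by name: the statement is the Claim_ definition above) =====
theorem check_name_match_spec : Claim_equal_check_name_match := by
  intro alex_name pure_authors _
  unfold Spec_check_name_match check_name_match check_name_match_alt
  cases hg : (PySem.Dict.ofList pure_authors).get? alex_name with
  | some v => simp only [hg]
  | none =>
    simp only [hg]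
    by_cases hlen : (pvSplitSp alex_name).length < 2
    · rw [if_pos hlen, if_pos (Or.inl hlen)]
    · by_cases hhd : (pvSplitSp alex_name).headD "" = ""
      · rw [if_neg hlen, if_pos (Or.inr hhd), hhd, pvLoopA_empty_first]
      · rw [if_neg hlen, if_neg (by tauto)]
        have hmem := fun p hp => pvGet?_of_mem (PySem.Dict.ofList pure_authors)
          (pvNK_ofList pure_authors) p hp
        rw [pvIndex_loop ((pvSplitSp alex_name).headD "") ((pvSplitSp alex_name).getLastD "")
          hhd (PySem.Dict.ofList pure_authors) (PySem.Dict.ofList pure_authors).items hmem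
          PySem.Dict.empty]
        simp [PySem.Dict.empty, PySem.Dict.get?, PySem.Dict.keys]
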